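-- pv_equiv track=rewrite | github.com/imxilife/ESP32RLCD4_2 | tools/gen_font_digits.py | glyph_to_lines
-- ===== SOURCE A (Python) =====
-- PIXEL_ON  = '█'
--
-- PIXEL_OFF = ' '
--
-- def glyph_to_lines(data, target_w, target_h):
--     """将 1bpp 字模数据解码为文本行列表（每行一个字符串）"""
--     stride = (target_w + 7) // 8
--     lines = []
--     for row in range(target_h):
--         line = ''
--         for col in range(target_w):
--             byte_idx = row * stride + (col >> 3)
--             bit_idx  = 7 - (col & 7)
--             line += PIXEL_ON if (data[byte_idx] & (1 << bit_idx)) else PIXEL_OFF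
--         lines.append(line)
--     return lines
-- ===== SOURCE B (Python) =====
-- PIXEL_ON  = '█'
--
-- PIXEL_OFF = ' '
--
-- # 256-entry lookup table: _LUT[v] is byte v rendered as 8 pixels, MSB first
-- _LUT = [''.join(PIXEL_ON if v & (1 << (7 - i)) else PIXEL_OFF for i in range(8))
--         for v in range(256)]
--
-- def glyph_to_lines(data, target_w, target_h):
--     """将 1bpp 字模数据解码为文本行列表（每行一个字符串）"""
--     stride = (target_w + 7) // 8
--     return [
--         ''.join(_LUT[data[row * stride + b] % 256] for b in range(stride))[:target_w]
--         for row in range(target_h)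
--     ]
-- ===== Notes on version B (the rewrite author's own statement) =====
-- stated objective: faster
-- what changed: Replaces A's per-pixel byte/bit index arithmetic with a precomputed 256-entry lookup table decoded one byte (8 pixels) at a time, each row joined and then sliced to target_w.
import Mathlib
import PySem

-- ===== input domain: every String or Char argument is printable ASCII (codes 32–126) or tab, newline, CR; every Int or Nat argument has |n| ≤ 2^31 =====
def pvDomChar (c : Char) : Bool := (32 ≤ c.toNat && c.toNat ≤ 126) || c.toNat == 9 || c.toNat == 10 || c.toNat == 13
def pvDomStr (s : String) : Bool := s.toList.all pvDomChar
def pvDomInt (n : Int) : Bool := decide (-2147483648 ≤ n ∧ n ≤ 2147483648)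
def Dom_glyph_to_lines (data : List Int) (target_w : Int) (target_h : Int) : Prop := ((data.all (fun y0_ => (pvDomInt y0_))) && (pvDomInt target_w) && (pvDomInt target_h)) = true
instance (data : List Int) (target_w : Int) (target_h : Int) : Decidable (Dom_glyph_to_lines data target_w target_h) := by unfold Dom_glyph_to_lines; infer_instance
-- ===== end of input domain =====

-- B replaces A's per-pixel byte/bit arithmetic by a 256-entry per-byte lookup table (byte-at-a-time decode, then each row sliced to target_w); return values proved equal wherever A returns.

def pvPixelOn : List Char := ['█']
def pvPixelOff : List Char := [' ']

-- ===== PORT A =====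
def glyph_to_lines (data : List Int) (target_w : Int) (target_h : Int) : List String :=
  let stride := PySem.Int.floordiv (target_w + 7) 8
  (PySem.List.pyRange 0 target_h 1).foldl
    (fun lines row =>
      lines ++ [String.ofList ((PySem.List.pyRange 0 target_w 1).foldl
        (fun line col =>
          line ++ (if PySem.Int.band (PySem.List.pyGetD data (row * stride + (col >>> (3:Int))) 0)
                      ((1:Int) <<< (7 - PySem.Int.band col 7)) ≠ 0
                   then pvPixelOn else pvPixelOff)) [])]) []

-- ===== PORT B =====
-- _LUT entry builder: the 8-character bit pattern of one byte value, MSB first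
def pvLutByte (v : Int) : List Char :=
  (PySem.List.pyRange 0 8 1).foldl
    (fun acc i => acc ++ (if PySem.Int.band v ((1:Int) <<< (7 - i)) ≠ 0
                          then pvPixelOn else pvPixelOff)) []

-- the precomputed 256-entry table _LUT
def pvLUT : List (List Char) := (PySem.List.pyRange 0 256 1).map pvLutByte

def glyph_to_lines_alt (data : List Int) (target_w : Int) (target_h : Int) : List String :=
  let stride := PySem.Int.floordiv (target_w + 7) 8
  (PySem.List.pyRange 0 target_h 1).map (fun row =>
    String.ofList (PySem.List.slice
      (((PySem.List.pyRange 0 stride 1).map (fun b =>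
          PySem.List.pyGetD pvLUT
            (PySem.Int.mod (PySem.List.pyGetD data (row * stride + b) 0) 256) [])).flatten)
      none (some target_w)))

-- ===== PRECONDITION & SPEC =====
-- Pre_ excludes exactly the inputs on which Python A raises IndexError (data too short
-- for the requested target_w × target_h grid); A returns on every input admitted here.
def Pre_glyph_to_lines (data : List Int) (target_w : Int) (target_h : Int) : Prop :=
  target_h ≤ 0 ∨ target_w ≤ 0 ∨
    (target_h - 1) * PySem.Int.floordiv (target_w + 7) 8 + PySem.Int.floordiv (target_w - 1) 8
      < (data.length : Int)
instance (data : List Int) (target_w : Int) (target_h : Int) : Decidable (Pre_glyph_to_lines data target_w target_h) := by unfold Pre_glyph_to_lines; infer_instance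

def pvWitness_glyph_to_lines : List Int × Int × Int := ([240, 15], 8, 2)

def Spec_glyph_to_lines (data : List Int) (target_w : Int) (target_h : Int) (out : List String) : Prop := out = glyph_to_lines_alt data target_w target_h
instance (data : List Int) (target_w : Int) (target_h : Int) (out : List String) : Decidable (Spec_glyph_to_lines data target_w target_h out) := by unfold Spec_glyph_to_lines; infer_instance

-- ===== CLAIM (what is proved, stated in full; the proofs are below) =====
def Claim_equal_glyph_to_lines : Prop := ∀ (data : List Int) (target_w : Int) (target_h : Int), Dom_glyph_to_lines data target_w target_h → Pre_glyph_to_lines data target_w target_h → Spec_glyph_to_lines data target_w target_h (glyph_to_lines data target_w target_h)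

-- ===== LEMMAS AND PROOFS =====

-- the two one-character chunks, as singleton lists of their character
theorem pvPix_ite (c : Prop) [Decidable c] :
    (if c then pvPixelOn else pvPixelOff) = [if c then '█' else ' '] := by
  by_cases h : c <;> simp [h, pvPixelOn, pvPixelOff]

-- (1 : Int) <<< j is the natural number 2^j


-- band with a single-bit mask, via testBit
theorem pvBand_two_pow (x : Int) (j : Nat) :
    PySem.Int.band x ((2 ^ j : Nat) : Int) = if x.testBit j then ((2 ^ j : Nat) : Int) else 0 := by
  cases x with
  | ofNat a =>
      rw [show (Int.ofNat a) = ((a : Nat) : Int) from rfl, PySem.Int.band_natCast,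
          Nat.and_two_pow]
      simp [Int.testBit]
      cases a.testBit j <;> simp
  | negSucc a =>
      have hx : ¬ (0 ≤ Int.negSucc a) := by
        rw [Int.negSucc_eq]; omega
      have hp : (0 : Int) ≤ ((2 ^ j : Nat) : Int) := by positivity
      unfold PySem.Int.band
      rw [if_neg hx, if_pos hp]
      have h1 : (-(Int.negSucc a) - 1).toNat = a := by rw [Int.negSucc_eq]; omega
      rw [h1, Int.toNat_natCast, Nat.two_pow_and]
      simp only [Int.testBit]
      rcases Bool.eq_false_or_eq_true (a.testBit j) with h | h <;> simp [h]

-- low 8 bits of x % 256 are the low 8 bits of x (single-bit mask version)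
set_option maxRecDepth 8192 in
theorem pvBand_mod256 (x : Int) (j : Nat) (hj : j < 8) :
    PySem.Int.band (PySem.Int.mod x 256) ((1:Int) <<< (j:Int)) = PySem.Int.band x ((1:Int) <<< (j:Int)) := by
  rw [PySem.Int.mod_eq_emod_of_pos (by norm_num), Int.one_shiftLeft,
      pvBand_two_pow, pvBand_two_pow]
  have hbit : (x % 256).testBit j = x.testBit j := by
    cases x with
    | ofNat a =>
        have hmod : (Int.ofNat a) % 256 = ((a % 256 : Nat) : Int) := by
          rw [show (Int.ofNat a) = ((a : Nat) : Int) from rfl]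
          exact_mod_cast rfl
        rw [hmod]
        show (a % 256).testBit j = (Int.ofNat a).testBit j
        have h := Nat.testBit_mod_two_pow a 8 j
        norm_num at h
        simp [Int.testBit, h, hj]
    | negSucc a =>
        have he0 : 0 ≤ Int.negSucc a % 256 := Int.emod_nonneg _ (by norm_num)
        have he : (Int.negSucc a % 256).toNat = 255 - a % 256 := by
          rw [Int.negSucc_eq]; omega
        have hrepr : Int.negSucc a % 256 = (((255 - a % 256 : Nat)) : Int) := by
          rw [← he]; exact (Int.toNat_of_nonneg he0).symm
        rw [hrepr]
        have hsub : 255 - a % 256 = 255 ^^^ (a % 256) := by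
          have h256 : a % 256 < 256 := Nat.mod_lt _ (by norm_num)
          revert h256
          generalize a % 256 = m
          revert m
          decide
        have h255 : (255 : Nat).testBit j = true := by
          interval_cases j <;> decide
        have hm : (a % 256).testBit j = a.testBit j := by
          have h := Nat.testBit_mod_two_pow a 8 j
          norm_num at h
          simp [h, hj]
        show (255 - a % 256 : Nat).testBit j = (Int.negSucc a).testBit j
        rw [hsub, Nat.testBit_xor, h255, hm]
        simp [Int.testBit]
  rw [hbit]

-- pvLUT lookup at x % 256 is the bit pattern of x % 256
theorem pvLUT_get (x : Int) :
    PySem.List.pyGetD pvLUT (PySem.Int.mod x 256) [] = pvLutByte (PySem.Int.mod x 256) := by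
  have h0 : 0 ≤ PySem.Int.mod x 256 := by
    rw [PySem.Int.mod_eq_emod_of_pos (by norm_num)]
    exact Int.emod_nonneg _ (by norm_num)
  have h1 : PySem.Int.mod x 256 < 256 := by
    rw [PySem.Int.mod_eq_emod_of_pos (by norm_num)]
    exact Int.emod_lt_of_pos _ (by norm_num)
  have hl : pvLUT.length = 256 := by
    simp [pvLUT, PySem.List.pyRange_one]
  have h2 : PySem.Int.mod x 256 < (pvLUT.length : Int) := by
    rw [hl]; exact_mod_cast h1
  rw [PySem.List.pyGetD_eq_getElem _ _ h0 h2]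
  simp only [pvLUT, PySem.List.pyRange_one, List.map_map, List.getElem_map,
             List.getElem_range, Function.comp]
  congr 1
  omega

-- the LUT entry as a map over bit positions
theorem pvLutByte_eq (v : Int) :
    pvLutByte v
      = (List.range 8).map
          (fun j => if PySem.Int.band v ((1:Int) <<< ((7 - j : Nat) : Int)) ≠ 0 then '█' else ' ') := by
  unfold pvLutByte
  rw [show (fun (acc : List Char) (i : Int) =>
        acc ++ (if PySem.Int.band v ((1:Int) <<< (7 - i)) ≠ 0 then pvPixelOn else pvPixelOff))
      = (fun acc i => acc ++ [if PySem.Int.band v ((1:Int) <<< (7 - i)) ≠ 0 then '█' else ' '])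
      from by funext acc i; rw [pvPix_ite]]
  rw [PySem.List.foldl_append_singleton_eq_map, List.nil_append, PySem.List.pyRange_one]
  rw [List.map_map]
  refine List.map_congr_left ?_
  intro j hj
  have hj8 : j < 8 := by simpa using hj
  simp only [Function.comp]
  have hj' : (7 : Int) - (0 + (j:Int)) = ((7 - j : Nat) : Int) := by omega
  rw [hj']

-- flatten of uniformly k-sized blocks over range n
theorem pvFlatten_range_mul {α : Type} (k n : Nat) (f : Nat → α) :
    ((List.range n).map (fun b => (List.range k).map (fun j => f (k * b + j)))).flatten
      = (List.range (k * n)).map f := by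
  induction n with
  | zero => simp
  | succ n ih =>
    rw [List.range_succ, List.map_append, List.flatten_append, ih,
        Nat.mul_succ, List.range_add, List.map_append]
    simp

-- the character at flat pixel position i of B's row `row` (proof-local abbreviation)
def pvF (data : List Int) (row s : Int) (i : Nat) : Char :=
  if PySem.Int.band
      (PySem.Int.mod (PySem.List.pyGetD data (row * s + ((i / 8 : Nat) : Int)) 0) 256)
      ((1:Int) <<< ((7 - i % 8 : Nat) : Int)) ≠ 0
  then '█' else ' '

-- one row of A equals one row of B
theorem pvRow (data : List Int) (w row : Int) :
    ((PySem.List.pyRange 0 w 1).foldl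
      (fun line col =>
        line ++ (if PySem.Int.band (PySem.List.pyGetD data (row * PySem.Int.floordiv (w + 7) 8 + (col >>> (3:Int))) 0)
                    ((1:Int) <<< (7 - PySem.Int.band col 7)) ≠ 0
                 then pvPixelOn else pvPixelOff)) [])
      = PySem.List.slice
          (((PySem.List.pyRange 0 (PySem.Int.floordiv (w + 7) 8) 1).map (fun b =>
              PySem.List.pyGetD pvLUT
                (PySem.Int.mod (PySem.List.pyGetD data (row * PySem.Int.floordiv (w + 7) 8 + b) 0) 256) [])).flatten)
          none (some w) := by
  by_cases hw : w ≤ 0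
  · have hslt : PySem.Int.floordiv (w + 7) 8 < 1 :=
      (PySem.Int.floordiv_lt_iff_lt_mul (by norm_num)).mpr (by omega)
    rw [PySem.List.pyRange_one_eq_nil hw, PySem.List.pyRange_one_eq_nil (by omega)]
    simp [PySem.List.slice]
  · have hw : 0 < w := by omega
    have hb : PySem.Int.floordiv (w + 7) 8 * 8 ≤ w + 7 ∧
        w + 7 < (PySem.Int.floordiv (w + 7) 8 + 1) * 8 :=
      (PySem.Int.floordiv_eq_iff_of_pos (by norm_num)).mp rfl
    generalize hsdef : PySem.Int.floordiv (w + 7) 8 = s at hb ⊢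
    have hs0 : 0 < s := by omega
    have hsw : w ≤ 8 * s := by omega
    -- A side: the loop as a map over pixel columns
    rw [show (fun (line : List Char) (col : Int) =>
          line ++ (if PySem.Int.band (PySem.List.pyGetD data (row * s + (col >>> (3:Int))) 0)
                      ((1:Int) <<< (7 - PySem.Int.band col 7)) ≠ 0
                   then pvPixelOn else pvPixelOff))
        = (fun line col =>
          line ++ [if PySem.Int.band (PySem.List.pyGetD data (row * s + (col >>> (3:Int))) 0)
                      ((1:Int) <<< (7 - PySem.Int.band col 7)) ≠ 0
                   then '█' else ' '])
        from by funext l c; rw [pvPix_ite]]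
    rw [PySem.List.foldl_append_singleton_eq_map, List.nil_append]
    -- B side: LUT entries as 8-character blocks, flattened
    have hBmap : (PySem.List.pyRange 0 s 1).map (fun b =>
          PySem.List.pyGetD pvLUT
            (PySem.Int.mod (PySem.List.pyGetD data (row * s + b) 0) 256) [])
        = (List.range s.toNat).map
            (fun b => (List.range 8).map (fun j => pvF data row s (8 * b + j))) := by
      rw [PySem.List.pyRange_one, show ((s:Int) - 0).toNat = s.toNat from by omega,
          List.map_map]
      refine List.map_congr_left ?_
      intro b _
      simp only [Function.comp, zero_add]
      rw [pvLUT_get, pvLutByte_eq]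
      refine List.map_congr_left ?_
      intro j hj
      have hj8 : j < 8 := by simpa using hj
      have h1 : (8 * b + j) / 8 = b := by omega
      have h2 : (8 * b + j) % 8 = j := by omega
      simp [pvF, h1, h2]
    rw [hBmap, pvFlatten_range_mul, PySem.List.slice_to _ (by omega : (0:Int) ≤ w),
        ← List.map_take, List.take_range,
        Nat.min_eq_left (by omega : w.toNat ≤ 8 * s.toNat)]
    -- pixel-by-pixel
    rw [PySem.List.pyRange_one, List.map_map]
    have hw0 : (w - 0).toNat = w.toNat := by omega
    rw [hw0]
    refine List.map_congr_left ?_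
    intro k _
    simp only [Function.comp, zero_add]
    have hshift : ((k : Nat) : Int) >>> (3:Int) = ((k / 8 : Nat) : Int) := by
      rw [show ((3:Int)) = ((3:Nat):Int) from rfl, Int.shiftRight_natCast,
          Nat.shiftRight_eq_div_pow]
    have hband7 : PySem.Int.band ((k : Nat) : Int) 7 = ((k % 8 : Nat) : Int) := by
      have h := PySem.Int.band_natCast k 7
      have h7 : k &&& 7 = k % 8 := by
        have h' := Nat.and_two_pow_sub_one_eq_mod k 3
        norm_num at h'
        exact h'
      rw [h7] at h
      exact_mod_cast h
    have hexp : (7 : Int) - ((k % 8 : Nat) : Int) = ((7 - k % 8 : Nat) : Int) := by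
      have : k % 8 < 8 := Nat.mod_lt _ (by norm_num)
      push_cast
      omega
    rw [hshift, hband7, hexp, ← pvBand_mod256 _ _ (by omega)]
    rfl

-- ===== VERDICT (by name: the statement is the Claim_ definition above) =====
theorem glyph_to_lines_spec : Claim_equal_glyph_to_lines := by
  intro data w h _ _
  unfold Spec_glyph_to_lines
  simp only [glyph_to_lines, glyph_to_lines_alt]
  rw [PySem.List.foldl_append_singleton_eq_map
        (f := fun row => String.ofList ((PySem.List.pyRange 0 w 1).foldl
          (fun line col =>
            line ++ (if PySem.Int.band (PySem.List.pyGetD data (row * PySem.Int.floordiv (w + 7) 8 + (col >>> (3:Int))) 0)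
                        ((1:Int) <<< (7 - PySem.Int.band col 7)) ≠ 0
                     then pvPixelOn else pvPixelOff)) []))]
  rw [List.nil_append]
  exact List.map_congr_left (fun row _ => congrArg String.ofList (pvRow data w row))
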